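-- pv_equiv track=rewrite | github.com/brkdnmz/inzvaland | OPC/24/omer-sunu-da-bi-test-et-hele-sana-zahmet/solution.py | unoptimized
-- ===== SOURCE A (Python) =====
-- def unoptimized(n: int, m: int):
--     ans = 0
--     n_squares = 0
--     for a in range(1, n):
--         for b in range(1, m):
--             a1 = (n - a) // b
--             a2 = (m - b) // a
--             ans += min(a1, a2)
--             n_squares += min(a1, a2) > 0
--     return ans * 2 - n_squares
-- ===== SOURCE B (Python) =====
-- def unoptimized(n: int, m: int):
--     # Count lattice triples: min(a1, a2) = #{t >= 1 : t*b <= n-a and t*a + b <= m};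
--     # swapping the (b, t) summation makes the inner loop run only while t*a < m,
--     # giving a harmonic O(m log n) total instead of O(n*m).
--     total = 0
--     for a in range(1, n):
--         na = n - a
--         tmax = min(na, (m - 1) // a)
--         for t in range(1, tmax + 1):
--             total += 2 * min(na // t, m - t * a)
--         if tmax >= 1:
--             total -= min(na, m - a)
--     return total
-- ===== Notes on version B (the rewrite author's own statement) =====
-- stated objective: faster
-- what changed: Rewrites min(a1,a2) as the count of lattice triples (a,b,t) with t*b <= n-a and t*a+b <= m, swaps the (b,t) summation so the inner loop over t runs only while t*a < m (harmonic bound), and replaces the positivity count by its closed count per a.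
import Mathlib
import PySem

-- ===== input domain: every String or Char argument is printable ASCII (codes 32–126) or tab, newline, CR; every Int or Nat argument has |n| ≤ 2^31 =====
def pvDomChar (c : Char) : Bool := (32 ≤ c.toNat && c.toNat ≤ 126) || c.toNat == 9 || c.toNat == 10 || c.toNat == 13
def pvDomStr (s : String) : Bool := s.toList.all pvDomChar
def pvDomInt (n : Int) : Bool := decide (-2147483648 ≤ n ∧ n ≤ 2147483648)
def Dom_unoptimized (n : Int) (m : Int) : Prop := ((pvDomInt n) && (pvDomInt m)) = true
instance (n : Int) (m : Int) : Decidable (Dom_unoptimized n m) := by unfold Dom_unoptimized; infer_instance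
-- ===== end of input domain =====

-- B counts the lattice triples (a,b,t) with t*b ≤ n-a and t*a+b ≤ m by summing over (a,t)
-- instead of (a,b), which makes the inner loop harmonic-length; measured asymptotically faster.


-- ===== PORT A =====
-- literal transliteration: double loop accumulating (ans, n_squares)
def unoptimized (n : Int) (m : Int) : Int :=
  let st := (PySem.List.pyRange 1 n 1).foldl (fun (st : Int × Int) a =>
    (PySem.List.pyRange 1 m 1).foldl (fun (st : Int × Int) b =>
      let a1 := PySem.Int.floordiv (n - a) b
      let a2 := PySem.Int.floordiv (m - b) a
      (st.1 + min a1 a2, st.2 + (if 0 < min a1 a2 then 1 else 0))) st) ((0 : Int), (0 : Int))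
  st.1 * 2 - st.2

-- ===== PORT B =====
-- literal transliteration of Source B: per a, sum over t up to tmax, then the t=1 correction
def unoptimized_alt (n : Int) (m : Int) : Int :=
  (PySem.List.pyRange 1 n 1).foldl (fun (total : Int) a =>
    let na := n - a
    let tmax := min na (PySem.Int.floordiv (m - 1) a)
    let total := (PySem.List.pyRange 1 (tmax + 1) 1).foldl
        (fun (tot : Int) t => tot + 2 * min (PySem.Int.floordiv na t) (m - t * a)) total
    if 1 ≤ tmax then total - min na (m - a) else total) 0

-- ===== PRECONDITION & SPEC =====
def Spec_unoptimized (n : Int) (m : Int) (out : Int) : Prop := out = unoptimized_alt n m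
instance (n : Int) (m : Int) (out : Int) : Decidable (Spec_unoptimized n m out) := by unfold Spec_unoptimized; infer_instance

-- ===== CLAIM (what is proved, stated in full; the proofs are below) =====
def Claim_equal_unoptimized : Prop := ∀ (n : Int) (m : Int), Dom_unoptimized n m → Spec_unoptimized n m (unoptimized n m)

-- ===== LEMMAS AND PROOFS =====

lemma lin_sum (l : List Int) (f g : Int → Int) :
    2 * (l.map f).sum - (l.map g).sum = (l.map (fun a => 2 * f a - g a)).sum := by
  induction l with
  | nil => simp
  | cons x t ih => simp only [List.map_cons, List.sum_cons]; linarith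

lemma count_le (c m : Int) (hc : c ≤ m - 1) :
    ((PySem.List.pyRange 1 m 1).map (fun t => if t ≤ c then (1:Int) else 0)).sum = max 0 c := by
  rcases le_or_gt c 0 with h | h
  · rw [List.map_congr_left (g := fun _ => (0:Int))
      (fun t ht => by rw [PySem.List.mem_pyRange_one] at ht; exact if_neg (by omega))]
    simp
    omega
  · rw [PySem.List.pyRange_one_append 1 (c+1) m (by omega) (by omega), List.map_append,
        List.sum_append,
        List.map_congr_left (l := PySem.List.pyRange 1 (c+1) 1) (g := fun _ => (1:Int))
          (fun t ht => by rw [PySem.List.mem_pyRange_one] at ht; exact if_pos (by omega)),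
        List.map_congr_left (l := PySem.List.pyRange (c+1) m 1) (g := fun _ => (0:Int))
          (fun t ht => by rw [PySem.List.mem_pyRange_one] at ht; exact if_neg (by omega))]
    simp [PySem.List.length_pyRange_one]
    omega

lemma sum_swap (l1 l2 : List Int) (g : Int → Int → Int) :
    (l1.map (fun b => (l2.map (g b)).sum)).sum
      = (l2.map (fun t => (l1.map (fun b => g b t)).sum)).sum := by
  induction l1 with
  | nil => simp
  | cons x t ih =>
      simp only [List.map_cons, List.sum_cons, ih]
      rw [← PySem.List.sum_map_add_int]

lemma fd_le_self (x d : Int) (hx : 0 ≤ x) (hd : 1 ≤ d) : PySem.Int.floordiv x d ≤ x := by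
  have h := (PySem.Int.floordiv_lt_iff_lt_mul (a := x) (b := d) (q := x + 1) (by omega)).mpr
    (by nlinarith)
  omega

lemma per_b (n m a b : Int) (ha : 1 ≤ a) (han : a < n) (hb : 1 ≤ b) (hbm : b < m) :
    min (PySem.Int.floordiv (n-a) b) (PySem.Int.floordiv (m-b) a)
      = ((PySem.List.pyRange 1 m 1).map
          (fun t => if t * b ≤ n - a ∧ t * a + b ≤ m then (1:Int) else 0)).sum := by
  have hX : (0:Int) ≤ PySem.Int.floordiv (n-a) b :=
    (PySem.Int.le_floordiv_iff_mul_le (by omega)).mpr (by omega)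
  have hY : PySem.Int.floordiv (m-b) a ≤ m - b := fd_le_self _ _ (by omega) ha
  have hY0 : (0:Int) ≤ PySem.Int.floordiv (m-b) a :=
    (PySem.Int.le_floordiv_iff_mul_le (by omega)).mpr (by omega)
  rw [List.map_congr_left
      (g := fun t => if t ≤ min (PySem.Int.floordiv (n-a) b) (PySem.Int.floordiv (m-b) a)
            then (1:Int) else 0)
      (fun t _ => by
        have h1 : t * b ≤ n - a ↔ t ≤ PySem.Int.floordiv (n-a) b :=
          (PySem.Int.le_floordiv_iff_mul_le (by omega)).symm
        have h2 : t * a + b ≤ m ↔ t ≤ PySem.Int.floordiv (m-b) a := by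
          rw [PySem.Int.le_floordiv_iff_mul_le (by omega)]; omega
        simp only [le_min_iff, h1, h2])]
  rw [count_le _ _ (by omega)]
  omega

lemma per_t (n m a t : Int) (ha : 1 ≤ a) (ht : 1 ≤ t) :
    ((PySem.List.pyRange 1 m 1).map
        (fun b => if t * b ≤ n - a ∧ t * a + b ≤ m then (1:Int) else 0)).sum
      = max 0 (min (PySem.Int.floordiv (n-a) t) (m - t*a)) := by
  have hta : 1 ≤ t * a := by nlinarith
  rw [List.map_congr_left
      (g := fun b => if b ≤ min (PySem.Int.floordiv (n-a) t) (m - t*a) then (1:Int) else 0)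
      (fun b _ => by
        have h1 : t * b ≤ n - a ↔ b ≤ PySem.Int.floordiv (n-a) t := by
          rw [PySem.Int.le_floordiv_iff_mul_le (by omega)]; constructor <;> intro h <;> nlinarith [mul_comm t b]
        have h2 : t * a + b ≤ m ↔ b ≤ m - t * a := by constructor <;> intro <;> linarith
        simp only [le_min_iff, h1, h2])]
  exact count_le _ _ (by omega)

lemma tail_sum (n m a : Int) (ha : 1 ≤ a) (han : a < n) :
    ((PySem.List.pyRange 1 m 1).map
        (fun t => max 0 (min (PySem.Int.floordiv (n-a) t) (m - t*a)))).sum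
      = ((PySem.List.pyRange 1 (min (n-a) (PySem.Int.floordiv (m-1) a) + 1) 1).map
          (fun t => min (PySem.Int.floordiv (n-a) t) (m - t*a))).sum := by
  set tmax := min (n-a) (PySem.Int.floordiv (m-1) a) with htmax
  rcases le_or_gt m 1 with hm | hm
  · have h1 : PySem.Int.floordiv (m-1) a < 1 :=
      (PySem.Int.floordiv_lt_iff_lt_mul (by omega)).mpr (by nlinarith)
    rw [PySem.List.pyRange_one_eq_nil (by omega), PySem.List.pyRange_one_eq_nil (by omega)]
    simp
  · have h0 : (0:Int) ≤ PySem.Int.floordiv (m-1) a :=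
      (PySem.Int.le_floordiv_iff_mul_le (by omega)).mpr (by omega)
    have h1 : PySem.Int.floordiv (m-1) a ≤ m - 1 := fd_le_self _ _ (by omega) ha
    rw [PySem.List.pyRange_one_append 1 (tmax+1) m (by omega) (by omega), List.map_append,
        List.sum_append,
        List.map_congr_left (l := PySem.List.pyRange 1 (tmax+1) 1)
          (g := fun t => min (PySem.Int.floordiv (n-a) t) (m - t*a))
          (fun t ht => by
            rw [PySem.List.mem_pyRange_one] at ht
            have hf : 1 ≤ PySem.Int.floordiv (n-a) t :=
              (PySem.Int.le_floordiv_iff_mul_le (by omega)).mpr (by omega)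
            have hfa : t * a ≤ m - 1 := by
              have := (PySem.Int.le_floordiv_iff_mul_le (a := m-1) (b := a) (q := t)
                (by omega)).mp (by omega)
              omega
            exact max_eq_right (by omega)),
        List.map_congr_left (l := PySem.List.pyRange (tmax+1) m 1) (g := fun _ => (0:Int))
          (fun t ht => by
            rw [PySem.List.mem_pyRange_one] at ht
            rcases le_or_gt t (n - a) with h2 | h2
            · -- then t > floordiv (m-1) a, so m - t*a ≤ 0
              have h3 : PySem.Int.floordiv (m-1) a < t := by omega
              have h4 : m - 1 < t * a := (PySem.Int.floordiv_lt_iff_lt_mul (by omega)).mp h3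
              exact max_eq_left (by omega)
            · have h3 : PySem.Int.floordiv (n-a) t < 1 :=
                (PySem.Int.floordiv_lt_iff_lt_mul (by omega)).mpr (by omega)
              exact max_eq_left (by omega))]
    simp

lemma cnt_sum (n m a : Int) (ha : 1 ≤ a) (han : a < n) :
    ((PySem.List.pyRange 1 m 1).map
        (fun b => if 0 < min (PySem.Int.floordiv (n-a) b) (PySem.Int.floordiv (m-b) a)
                  then (1:Int) else 0)).sum
      = if 1 ≤ min (n-a) (PySem.Int.floordiv (m-1) a) then min (n-a) (m-a) else 0 := by
  rw [List.map_congr_left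
      (g := fun b => if b ≤ min (n-a) (m-a) then (1:Int) else 0)
      (fun b hb => by
        rw [PySem.List.mem_pyRange_one] at hb
        have h1 : 1 ≤ PySem.Int.floordiv (n-a) b ↔ b ≤ n - a := by
          rw [PySem.Int.le_floordiv_iff_mul_le (by omega)]; omega
        have h2 : 1 ≤ PySem.Int.floordiv (m-b) a ↔ b ≤ m - a := by
          rw [PySem.Int.le_floordiv_iff_mul_le (by omega)]; omega
        have : (0 < min (PySem.Int.floordiv (n-a) b) (PySem.Int.floordiv (m-b) a))
            ↔ (b ≤ min (n-a) (m-a)) := by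
          rw [lt_min_iff, le_min_iff, ← h1, ← h2]
          constructor <;> intro h <;> exact ⟨by omega, by omega⟩
        simp only [this])]
  rw [count_le _ _ (by omega)]
  rcases le_or_gt a (m-1) with h | h
  · have hfd : 1 ≤ PySem.Int.floordiv (m-1) a :=
      (PySem.Int.le_floordiv_iff_mul_le (by omega)).mpr (by omega)
    rw [if_pos (by omega)]
    omega
  · have hfd : PySem.Int.floordiv (m-1) a < 1 :=
      (PySem.Int.floordiv_lt_iff_lt_mul (by omega)).mpr (by omega)
    rw [if_neg (by omega)]
    omega

lemma per_a (n m a : Int) (ha : 1 ≤ a) (han : a < n) :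
    (if 1 ≤ min (n-a) (PySem.Int.floordiv (m-1) a)
     then ((PySem.List.pyRange 1 (min (n-a) (PySem.Int.floordiv (m-1) a) + 1) 1).map
            (fun t => 2 * min (PySem.Int.floordiv (n-a) t) (m - t*a))).sum - min (n-a) (m-a)
     else ((PySem.List.pyRange 1 (min (n-a) (PySem.Int.floordiv (m-1) a) + 1) 1).map
            (fun t => 2 * min (PySem.Int.floordiv (n-a) t) (m - t*a))).sum)
      = 2 * ((PySem.List.pyRange 1 m 1).map
              (fun b => min (PySem.Int.floordiv (n-a) b) (PySem.Int.floordiv (m-b) a))).sum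
        - ((PySem.List.pyRange 1 m 1).map
            (fun b => if 0 < min (PySem.Int.floordiv (n-a) b) (PySem.Int.floordiv (m-b) a)
                      then (1:Int) else 0)).sum := by
  have hAns : ((PySem.List.pyRange 1 m 1).map
      (fun b => min (PySem.Int.floordiv (n-a) b) (PySem.Int.floordiv (m-b) a))).sum
      = ((PySem.List.pyRange 1 (min (n-a) (PySem.Int.floordiv (m-1) a) + 1) 1).map
          (fun t => min (PySem.Int.floordiv (n-a) t) (m - t*a))).sum := by
    rw [List.map_congr_left
        (g := fun b => ((PySem.List.pyRange 1 m 1).map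
            (fun t => if t * b ≤ n - a ∧ t * a + b ≤ m then (1:Int) else 0)).sum)
        (fun b hb => by
          rw [PySem.List.mem_pyRange_one] at hb
          exact per_b n m a b ha han hb.1 hb.2),
        sum_swap,
        List.map_congr_left
          (g := fun t => max 0 (min (PySem.Int.floordiv (n-a) t) (m - t*a)))
          (fun t ht => by
            rw [PySem.List.mem_pyRange_one] at ht
            exact per_t n m a t ha ht.1)]
    exact tail_sum n m a ha han
  rw [hAns, cnt_sum n m a ha han, List.sum_map_mul_left]
  split_ifs <;> ring

lemma sum_comb (l : List Int) (f g u : Int → Int)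
    (h : ∀ a ∈ l, u a = 2 * f a - g a) :
    (l.map u).sum = 2 * (l.map f).sum - (l.map g).sum := by
  rw [lin_sum]; exact congrArg List.sum (List.map_congr_left h)
theorem unopt_eq (n m : Int) : unoptimized n m = unoptimized_alt n m := by
  have hinner : ∀ (st : Int × Int) (a : Int),
      (PySem.List.pyRange 1 m 1).foldl (fun (st : Int × Int) b =>
        let a1 := PySem.Int.floordiv (n - a) b
        let a2 := PySem.Int.floordiv (m - b) a
        (st.1 + min a1 a2, st.2 + (if 0 < min a1 a2 then 1 else 0))) st
      = (st.1 + ((PySem.List.pyRange 1 m 1).map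
            (fun b => min (PySem.Int.floordiv (n-a) b) (PySem.Int.floordiv (m-b) a))).sum,
         st.2 + ((PySem.List.pyRange 1 m 1).map
            (fun b => if 0 < min (PySem.Int.floordiv (n-a) b) (PySem.Int.floordiv (m-b) a)
                      then (1:Int) else 0)).sum) := by
    intro st a
    rw [show st = (st.1, st.2) by rfl, PySem.List.foldl_prod_mk
      (f := fun s b => s + min (PySem.Int.floordiv (n-a) b) (PySem.Int.floordiv (m-b) a))
      (g := fun s b => s + (if 0 < min (PySem.Int.floordiv (n-a) b) (PySem.Int.floordiv (m-b) a)
                      then (1:Int) else 0)),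
      PySem.List.foldl_add, PySem.List.foldl_add]
  have hA : unoptimized n m
      = 2 * ((PySem.List.pyRange 1 n 1).map (fun a => ((PySem.List.pyRange 1 m 1).map
            (fun b => min (PySem.Int.floordiv (n-a) b) (PySem.Int.floordiv (m-b) a))).sum)).sum
        - ((PySem.List.pyRange 1 n 1).map (fun a => ((PySem.List.pyRange 1 m 1).map
            (fun b => if 0 < min (PySem.Int.floordiv (n-a) b) (PySem.Int.floordiv (m-b) a)
                      then (1:Int) else 0)).sum)).sum := by
    show (let st : Int × Int := _; st.1 * 2 - st.2) = _
    rw [PySem.List.foldl_congr_mem _ _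
        (fun (st : Int × Int) a => (st.1 + ((PySem.List.pyRange 1 m 1).map
            (fun b => min (PySem.Int.floordiv (n-a) b) (PySem.Int.floordiv (m-b) a))).sum,
         st.2 + ((PySem.List.pyRange 1 m 1).map
            (fun b => if 0 < min (PySem.Int.floordiv (n-a) b) (PySem.Int.floordiv (m-b) a)
                      then (1:Int) else 0)).sum)) _
        (fun st a _ => hinner st a),
      PySem.List.foldl_prod_mk
        (f := fun s a => s + ((PySem.List.pyRange 1 m 1).map
            (fun b => min (PySem.Int.floordiv (n-a) b) (PySem.Int.floordiv (m-b) a))).sum)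
        (g := fun s a => s + ((PySem.List.pyRange 1 m 1).map
            (fun b => if 0 < min (PySem.Int.floordiv (n-a) b) (PySem.Int.floordiv (m-b) a)
                      then (1:Int) else 0)).sum),
      PySem.List.foldl_add, PySem.List.foldl_add]
    simp only [zero_add]
    ring
  have hB : unoptimized_alt n m
      = ((PySem.List.pyRange 1 n 1).map (fun a =>
          if 1 ≤ min (n-a) (PySem.Int.floordiv (m-1) a)
          then ((PySem.List.pyRange 1 (min (n-a) (PySem.Int.floordiv (m-1) a) + 1) 1).map
                 (fun t => 2 * min (PySem.Int.floordiv (n-a) t) (m - t*a))).sum - min (n-a) (m-a)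
          else ((PySem.List.pyRange 1 (min (n-a) (PySem.Int.floordiv (m-1) a) + 1) 1).map
                 (fun t => 2 * min (PySem.Int.floordiv (n-a) t) (m - t*a))).sum)).sum := by
    show (PySem.List.pyRange 1 n 1).foldl _ 0 = _
    rw [PySem.List.foldl_congr_mem _ _
        (fun (total : Int) a => total +
          (if 1 ≤ min (n-a) (PySem.Int.floordiv (m-1) a)
          then ((PySem.List.pyRange 1 (min (n-a) (PySem.Int.floordiv (m-1) a) + 1) 1).map
                 (fun t => 2 * min (PySem.Int.floordiv (n-a) t) (m - t*a))).sum - min (n-a) (m-a)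
          else ((PySem.List.pyRange 1 (min (n-a) (PySem.Int.floordiv (m-1) a) + 1) 1).map
                 (fun t => 2 * min (PySem.Int.floordiv (n-a) t) (m - t*a))).sum)) _
        (fun total a _ => by
          simp only
          rw [PySem.List.foldl_add]
          split_ifs <;> ring),
      PySem.List.foldl_add, zero_add]
  rw [hA, hB]
  exact (sum_comb _ _ _ _
    (fun a hamem => by
      rw [PySem.List.mem_pyRange_one] at hamem
      exact per_a n m a hamem.1 hamem.2)).symm

-- ===== VERDICT (by name: the statement is the Claim_ definition above) =====
theorem unoptimized_spec : Claim_equal_unoptimized := by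
  intro n m _
  show unoptimized n m = unoptimized_alt n m
  exact unopt_eq n m
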